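-- pv_equiv track=rewrite | github.com/mgls23/Euler | solutions/p92.py | memoised_chain
-- ===== SOURCE A (Python) =====
-- def memoised_chain(upper_bound):
--     chain_1, chain_89 = {1}, {89}
--
--     for number in range(2, upper_bound):
--         trail = {number}
--
--         while True:
--             if number in chain_1:
--                 chain_1 |= trail
--                 break
--
--             if number in chain_89:
--                 chain_89 |= trail
--                 break
--
--             number = sum(map(lambda x: x ** 2, map(int, str(number))))
--             trail.add(number)
--
--     return chain_1, chain_89
-- ===== SOURCE B (Python) =====
-- def memoised_chain(upper_bound):
--     chain_1, chain_89 = {1}, {89}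
--
--     def step(m):
--         s = 0
--         while m:
--             m, d = divmod(m, 10)
--             s += d * d
--         return s
--
--     for number in range(2, upper_bound):
--         # pass 1: classify by walking the raw digit-square chain to its terminal
--         # (1 or 89), with no memo lookup at all
--         m = number
--         while m != 1 and m != 89:
--             m = step(m)
--         dest = chain_1 if m == 1 else chain_89
--         # pass 2: gather the chain's fresh prefix against the destination set only,
--         # then commit it
--         trail = {number}
--         m = number
--         while m not in dest:
--             m = step(m)
--             trail.add(m)
--         dest |= trail
--
--     return chain_1, chain_89
-- ===== Notes on version B (the rewrite author's own statement) =====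
-- stated objective: alternative
-- what changed: B splits A's single break-driven walk that tests both memo sets into two staged passes per number: it first classifies by walking the raw digit-square chain to its terminal (1 or 89) with no memo lookup at all, then gathers the chain's fresh prefix against the destination set alone and commits it with one union; digits are extracted arithmetically with divmod instead of mapping int over str.
import Mathlib
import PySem

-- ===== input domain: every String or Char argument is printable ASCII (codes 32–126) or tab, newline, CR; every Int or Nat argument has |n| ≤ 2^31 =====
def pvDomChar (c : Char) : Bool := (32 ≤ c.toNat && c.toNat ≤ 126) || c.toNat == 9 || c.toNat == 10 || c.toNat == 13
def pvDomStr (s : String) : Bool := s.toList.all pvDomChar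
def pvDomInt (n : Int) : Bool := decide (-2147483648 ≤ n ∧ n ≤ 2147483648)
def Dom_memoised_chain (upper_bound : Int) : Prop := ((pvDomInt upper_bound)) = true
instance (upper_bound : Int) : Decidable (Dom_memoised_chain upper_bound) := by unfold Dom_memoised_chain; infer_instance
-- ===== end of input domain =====

-- B classifies each number by walking the raw digit-square chain to its terminal (1 or 89) with no
-- memo lookup, then replays the chain inserting fresh nodes into the terminal's set — two staged
-- passes with divmod digit extraction instead of A's single memo-truncated walk with a trail set.

-- ===== PORT A =====
-- sum(map(lambda x: x ** 2, map(int, str(number)))); int(c) of a single digit char is ported as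
-- c.toNat - 48, exact on the digit characters str(number) yields for the number ≥ 0 reached here.
def pvSqDigits (number : Int) : Int :=
  ((PySem.Int.toChars number).map (fun c => ((c.toNat : Int) - 48) ^ 2)).sum

-- the 'while True' loop; the fuel guard only totalizes it (1000 is never reached on Dom:
-- every chain hits the memo sets, which contain 1 and 89, within a few steps)
def pvLoopA : Nat → Int → PySem.Set Int → PySem.Set Int → PySem.Set Int →
    PySem.Set Int × PySem.Set Int
  | 0, _, _, chain1, chain89 => (chain1, chain89)
  | fuel + 1, number, trail, chain1, chain89 =>
    if chain1.contains number then (PySem.Set.union chain1 trail, chain89)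
    else if chain89.contains number then (chain1, PySem.Set.union chain89 trail)
    else
      let m := pvSqDigits number
      pvLoopA fuel m (PySem.Set.add trail m) chain1 chain89

def memoised_chain (upper_bound : Int) : List Int × List Int :=
  (PySem.List.pyRange 2 upper_bound 1).foldl
    (fun p number => pvLoopA 1000 number (PySem.Set.add PySem.Set.empty number) p.1 p.2)
    ([1], [89])

-- ===== PORT B =====
-- step's while loop; m.toNat fuel merely totalizes it (for the m ≥ 0 reached here,
-- m // 10 strictly decreases, so m.toNat steps always complete the loop)
def pvDssAux : Nat → Int → Int → Int
  | 0, _, s => s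
  | fuel + 1, m, s =>
    if m == 0 then s
    else pvDssAux fuel (PySem.Int.floordiv m 10) (s + PySem.Int.mod m 10 * PySem.Int.mod m 10)

def pvDigitSquareSum (m : Int) : Int := pvDssAux m.toNat m 0

-- pass 1: 'while m != 1 and m != 89: m = step(m)'; none = fuel guard (never reached on Dom),
-- in which case the sets are left unchanged
def pvFindTerm : Nat → Int → Option Int
  | 0, _ => none
  | fuel + 1, m => if m == 1 || m == 89 then some m else pvFindTerm fuel (pvDigitSquareSum m)

-- pass 2: 'while m not in dest: m = step(m); trail.add(m)'; none = fuel guard (never reached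
-- on Dom), in which case the sets are left unchanged
def pvBuildTrail : Nat → Int → PySem.Set Int → PySem.Set Int → Option (PySem.Set Int)
  | 0, _, _, _ => none
  | fuel + 1, m, trail, dest =>
    if dest.contains m then some trail
    else
      let m' := pvDigitSquareSum m
      pvBuildTrail fuel m' (PySem.Set.add trail m') dest

def memoised_chain_alt (upper_bound : Int) : List Int × List Int :=
  (PySem.List.pyRange 2 upper_bound 1).foldl
    (fun p number =>
      match pvFindTerm 1000 number with
      | none => p
      | some t =>
        match pvBuildTrail 1000 number (PySem.Set.add PySem.Set.empty number)
            (if t == 1 then p.1 else p.2) with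
        | none => p
        | some trail =>
          if t == 1 then (PySem.Set.union p.1 trail, p.2)
          else (p.1, PySem.Set.union p.2 trail))
    ([1], [89])

-- ===== PRECONDITION & SPEC =====
def Spec_memoised_chain (upper_bound : Int) (out : List Int × List Int) : Prop := out = memoised_chain_alt upper_bound
instance (upper_bound : Int) (out : List Int × List Int) : Decidable (Spec_memoised_chain upper_bound out) := by unfold Spec_memoised_chain; infer_instance

-- ===== CLAIM (what is proved, stated in full; the proofs are below) =====
def Claim_equal_memoised_chain : Prop := ∀ (upper_bound : Int), Dom_memoised_chain upper_bound → Spec_memoised_chain upper_bound (memoised_chain upper_bound)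

-- ===== LEMMAS AND PROOFS =====

-- sum of squared decimal digits of a Nat, the common reference value of both digit routines
def pvSqDigNat (n : Nat) : Int :=
  if h : n < 10 then (n : Int) ^ 2
  else ((n % 10 : Nat) : Int) ^ 2 + pvSqDigNat (n / 10)
decreasing_by exact Nat.div_lt_self (by omega) (by omega)

theorem pvSqDigNat_step (n : Nat) :
    pvSqDigNat n = ((n % 10 : Nat) : Int) ^ 2 + pvSqDigNat (n / 10) := by
  rw [pvSqDigNat]
  split
  · rename_i h
    rw [Nat.mod_eq_of_lt h, Nat.div_eq_of_lt h, pvSqDigNat]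
    simp
  · rfl

theorem pvGsq_digitChar (d : Nat) (h : d < 10) :
    (((d.digitChar).toNat : Int) - 48) ^ 2 = (d : Int) ^ 2 := by
  interval_cases d <;> decide

theorem pvToDigitsCore_sum (f : Nat) :
    ∀ (n : Nat) (acc : List Char), n < f →
      ((Nat.toDigitsCore 10 f n acc).map (fun c => ((c.toNat : Int) - 48) ^ 2)).sum
        = pvSqDigNat n + ((acc.map (fun c => ((c.toNat : Int) - 48) ^ 2)).sum) := by
  induction f with
  | zero => intro n acc h; omega
  | succ f ih =>
    intro n acc h
    rw [Nat.toDigitsCore]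
    split
    · rename_i h10
      have hn10 : n < 10 := by omega
      simp only [List.map_cons, List.sum_cons,
        pvGsq_digitChar (n % 10) (Nat.mod_lt _ (by omega))]
      rw [pvSqDigNat]
      simp [Nat.mod_eq_of_lt hn10, hn10]
    · rename_i h10
      have hn : 10 ≤ n := by
        by_contra hc
        exact h10 (Nat.div_eq_of_lt (by omega))
      rw [ih (n / 10) _ (by omega)]
      simp only [List.map_cons, List.sum_cons,
        pvGsq_digitChar (n % 10) (Nat.mod_lt _ (by omega))]
      rw [pvSqDigNat_step n]
      ring

theorem pvSqDigits_natCast (k : Nat) : pvSqDigits (k : Int) = pvSqDigNat k := by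
  unfold pvSqDigits PySem.Int.toChars
  rw [if_neg (by omega)]
  have : ((k : Int)).toNat = k := Int.toNat_natCast k
  rw [this, Nat.toDigits, pvToDigitsCore_sum (k + 1) k [] (by omega)]
  simp

theorem pvDssAux_eq (fu : Nat) :
    ∀ (n : Nat) (s : Int), n < 10 ^ fu → pvDssAux fu (n : Int) s = s + pvSqDigNat n := by
  induction fu with
  | zero =>
    intro n s h
    have : n = 0 := by omega
    subst this
    rw [pvDssAux, pvSqDigNat]
    simp
  | succ fu ih =>
    intro n s h
    rw [pvDssAux]
    by_cases h0 : n = 0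
    · subst h0
      rw [pvSqDigNat]
      simp
    · rw [if_neg (by simpa using (by exact_mod_cast h0 : ((n : Int) ≠ 0)))]
      have h10 : (10 : Int) = ((10 : Nat) : Int) := by norm_num
      rw [h10, PySem.Int.floordiv_natCast n 10, PySem.Int.mod_natCast n 10]
      rw [ih (n / 10) _ (by
        have : 10 ^ (fu + 1) = 10 ^ fu * 10 := by ring
        omega)]
      rw [pvSqDigNat_step n]
      ring

theorem pvDigitSquareSum_natCast (k : Nat) : pvDigitSquareSum (k : Int) = pvSqDigNat k := by
  unfold pvDigitSquareSum
  rw [Int.toNat_natCast k, pvDssAux_eq k k 0 (Nat.lt_pow_self (by omega))]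
  simp

-- the two digit routines agree on the nonnegative numbers the chains visit
theorem pvStep_eq (m : Int) (hm : 0 ≤ m) : pvSqDigits m = pvDigitSquareSum m := by
  obtain ⟨k, rfl⟩ := Int.eq_ofNat_of_zero_le hm
  rw [pvSqDigits_natCast, pvDigitSquareSum_natCast]

theorem pvSqDigNat_nonneg (n : Nat) : 0 ≤ pvSqDigNat n := by
  induction n using Nat.strong_induction_on with
  | _ n ih =>
    rw [pvSqDigNat]
    split
    · positivity
    · rename_i h
      have := ih (n / 10) (Nat.div_lt_self (by omega) (by omega))
      positivity

theorem pvSqDigits_nonneg (m : Int) (hm : 0 ≤ m) : 0 ≤ pvSqDigits m := by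
  obtain ⟨k, rfl⟩ := Int.eq_ofNat_of_zero_le hm
  rw [pvSqDigits_natCast]
  exact pvSqDigNat_nonneg k

theorem pvSqDigNat_le (k : Nat) : ∀ n : Nat, n < 10 ^ k → pvSqDigNat n ≤ 81 * k := by
  induction k with
  | zero =>
    intro n h
    have : n = 0 := by omega
    subst this
    rw [pvSqDigNat]
    simp
  | succ k ih =>
    intro n h
    rw [pvSqDigNat_step]
    have hd : (n % 10) ≤ 9 := by omega
    have hd' : ((n % 10 : Nat) : Int) ≤ 9 := by exact_mod_cast hd
    have hd0 : (0 : Int) ≤ ((n % 10 : Nat) : Int) := by positivity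
    have h2 : pvSqDigNat (n / 10) ≤ 81 * k := by
      apply ih
      have : 10 ^ (k + 1) = 10 ^ k * 10 := by ring
      omega
    have hsq : ((n % 10 : Nat) : Int) ^ 2 ≤ 81 := by nlinarith
    have hk1 : (81 : Int) * ((k + 1 : Nat) : Int) = 81 * (k : Int) + 81 := by push_cast; ring
    linarith

theorem pvSqDigNat_pos (n : Nat) (hn : 1 ≤ n) : 1 ≤ pvSqDigNat n := by
  induction n using Nat.strong_induction_on with
  | _ n ih =>
    rw [pvSqDigNat]
    split
    · rename_i h
      have : (1 : Int) ≤ (n : Int) := by exact_mod_cast hn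
      nlinarith
    · rename_i h
      have h1 : 1 ≤ pvSqDigNat (n / 10) :=
        ih (n / 10) (Nat.div_lt_self (by omega) (by omega)) (by omega)
      have : (0 : Int) ≤ ((n % 10 : Nat) : Int) ^ 2 := by positivity
      omega

theorem pvSqDigits_range (m : Int) (h1 : 1 ≤ m) (h2 : m < 10 ^ 10) :
    1 ≤ pvSqDigits m ∧ pvSqDigits m ≤ 810 := by
  obtain ⟨k, rfl⟩ := Int.eq_ofNat_of_zero_le (by omega : (0:Int) ≤ m)
  rw [pvSqDigits_natCast]
  have hk1 : 1 ≤ k := by exact_mod_cast h1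
  have hk2 : k < 10 ^ 10 := by exact_mod_cast h2
  exact ⟨pvSqDigNat_pos k hk1, by have := pvSqDigNat_le 10 k hk2; omega⟩

-- reference terminal finder: B's pass 1, but stepping with A's digit routine
def pvT : Nat → Int → Option Int
  | 0, _ => none
  | fuel + 1, m => if m == 1 || m == 89 then some m else pvT fuel (pvSqDigits m)

theorem pvFindTerm_eq_pvT (F : Nat) : ∀ m : Int, 0 ≤ m → pvFindTerm F m = pvT F m := by
  induction F with
  | zero => intro m _; rfl
  | succ F ih =>
    intro m hm
    rw [pvFindTerm, pvT]
    split
    · rfl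
    · rw [ih _ (by have := pvSqDigits_nonneg m hm; rw [pvStep_eq m hm] at this; exact this),
        ← pvStep_eq m hm]

theorem pvT_mono (F : Nat) : ∀ (F' : Nat) (m t : Int), F ≤ F' → pvT F m = some t → pvT F' m = some t := by
  induction F with
  | zero => intro F' m t _ h; simp [pvT] at h
  | succ F ih =>
    intro F' m t hle h
    obtain ⟨F'', rfl⟩ : ∃ F'', F' = F'' + 1 := ⟨F' - 1, by omega⟩
    rw [pvT] at h ⊢
    split at h
    · rename_i hc; rw [if_pos hc]; exact h
    · rename_i hc; rw [if_neg hc]; exact ih F'' _ t (by omega) h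

theorem pvT_shape (F : Nat) : ∀ m t : Int, pvT F m = some t → t = 1 ∨ t = 89 := by
  induction F with
  | zero => intro m t h; simp [pvT] at h
  | succ F ih =>
    intro m t h
    rw [pvT] at h
    split at h
    · rename_i hc
      cases Option.some.injEq .. ▸ h
      simp only [Bool.or_eq_true, beq_iff_eq] at hc
      simpa using hc
    · exact ih _ _ h

def pvTermOf (m t : Int) : Prop := ∃ F, pvT F m = some t

def pvReach (m : Int) : Prop := ∃ F, (pvT F m).isSome = true

noncomputable def pvDist (m : Int) : Nat := sInf {F | (pvT F m).isSome = true}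

theorem pvTermOf_unique {m t t' : Int} (h : pvTermOf m t) (h' : pvTermOf m t') : t = t' := by
  obtain ⟨F, hF⟩ := h
  obtain ⟨F', hF'⟩ := h'
  have h1 := pvT_mono F (max F F') m t (le_max_left _ _) hF
  have h2 := pvT_mono F' (max F F') m t' (le_max_right _ _) hF'
  rw [h1] at h2
  exact Option.some.inj h2

theorem pvTermOf_terminal {m t : Int} (h : pvTermOf m t) (hm : m = 1 ∨ m = 89) : m = t := by
  have hself : pvTermOf m m := ⟨1, by rw [pvT, if_pos (by rcases hm with h | h <;> simp [h])]⟩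
  exact pvTermOf_unique hself h

theorem pvTermOf_step {m t : Int} (h : pvTermOf m t) (h1 : m ≠ 1) (h89 : m ≠ 89) :
    pvTermOf (pvSqDigits m) t := by
  obtain ⟨F, hF⟩ := h
  match F with
  | 0 => simp [pvT] at hF
  | F + 1 =>
    rw [pvT, if_neg (by simp [h1, h89])] at hF
    exact ⟨F, hF⟩

theorem pvDist_le {m : Int} {F : Nat} (h : (pvT F m).isSome = true) : pvDist m ≤ F :=
  Nat.sInf_le h

theorem pvT_dist {m : Int} (h : pvReach m) : (pvT (pvDist m) m).isSome = true :=
  Nat.sInf_mem h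

theorem pvDist_step {m : Int} (hr : pvReach m) (h1 : m ≠ 1) (h89 : m ≠ 89) :
    pvReach (pvSqDigits m) ∧ pvDist (pvSqDigits m) < pvDist m := by
  have hs := pvT_dist hr
  obtain ⟨d, hd⟩ : ∃ d, pvDist m = d + 1 := by
    refine ⟨pvDist m - 1, ?_⟩
    have : pvDist m ≠ 0 := by
      intro h0
      rw [h0] at hs
      simp [pvT] at hs
    omega
  rw [hd, pvT, if_neg (by simp [h1, h89])] at hs
  exact ⟨⟨d, hs⟩, by have := pvDist_le hs; omega⟩

-- totality: every chain value in [1, 810] reaches its terminal within 20 steps (checked by kernel)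
set_option maxRecDepth 100000 in
set_option maxHeartbeats 2000000 in
theorem pvT_le810_bool :
    ((PySem.List.pyRange 1 811 1).all (fun n => (pvT 20 n).isSome)) = true := by decide

theorem pvT_le810 (m : Int) (h1 : 1 ≤ m) (h2 : m ≤ 810) : (pvT 20 m).isSome = true := by
  have := List.all_eq_true.mp pvT_le810_bool m
    (PySem.List.mem_pyRange_one.mpr ⟨h1, by omega⟩)
  exact this

theorem pvT21 (m : Int) (h1 : 1 ≤ m) (h2 : m < 10 ^ 10) : (pvT 21 m).isSome = true := by
  rw [pvT]
  split
  · rfl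
  · rename_i hc
    obtain ⟨hl, hu⟩ := pvSqDigits_range m h1 h2
    exact pvT_mono 20 20 _ _ (le_refl _) (Option.isSome_iff_exists.mp (pvT_le810 _ hl hu)).choose_spec ▸ pvT_le810 _ hl hu

-- pass 2 returns only nodes of a chain ending at t (beyond its starting trail)
theorem pvBuildTrail_mem (F : Nat) :
    ∀ (m : Int) (trail dest : PySem.Set Int) (t : Int) (tr : PySem.Set Int),
      0 ≤ m → pvTermOf m t → t ∈ dest →
      pvBuildTrail F m trail dest = some tr →
      ∀ x ∈ tr, x ∈ trail ∨ pvTermOf x t := by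
  induction F with
  | zero => intro m trail dest t tr _ _ _ h; simp [pvBuildTrail] at h
  | succ F ih =>
    intro m trail dest t tr hm htm htd h x hx
    rw [pvBuildTrail] at h
    split at h
    · cases h
      exact Or.inl hx
    · rename_i hc
      have hmd : m ∉ dest := fun h' => hc ((PySem.Set.contains_iff _ _).mpr h')
      have hmt : m ≠ 1 ∧ m ≠ 89 := by
        constructor <;> intro h' <;>
          exact hmd ((pvTermOf_terminal htm (by simp [h'])) ▸ htd)
      rw [show pvDigitSquareSum m = pvSqDigits m from (pvStep_eq m hm).symm] at h
      have := ih (pvSqDigits m) (PySem.Set.add trail (pvSqDigits m)) dest t tr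
        (pvSqDigits_nonneg m hm) (pvTermOf_step htm hmt.1 hmt.2) htd h x hx
      rcases this with h' | h'
      · rcases (PySem.Set.mem_add _ _ _).mp h' with h' | h'
        · exact Or.inl h'
        · exact Or.inr (h' ▸ pvTermOf_step htm hmt.1 hmt.2)
      · exact Or.inr h'

-- the core synchronisation: A's break-driven walk over both memo sets runs in lockstep with B's
-- trail gathering against the destination set alone, and commits the same trail there
theorem pvSync (FA : Nat) :
    ∀ (m : Int) (trail c1 c89 : PySem.Set Int) (FB : Nat) (t : Int),
      0 ≤ m → pvReach m → pvTermOf m t →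
      pvDist m < FA → pvDist m < FB →
      (1:Int) ∈ c1 → (89:Int) ∈ c89 →
      (∀ x ∈ c1, pvTermOf x 1) → (∀ x ∈ c89, pvTermOf x 89) →
      ∃ tr, pvBuildTrail FB m trail (if t = 1 then c1 else c89) = some tr ∧
        pvLoopA FA m trail c1 c89 =
          (if t = 1 then (PySem.Set.union c1 tr, c89) else (c1, PySem.Set.union c89 tr)) := by
  induction FA with
  | zero => intro m _ _ _ _ _ _ _ _ hFA; omega
  | succ FA ih =>
    intro m trail c1 c89 FB t hm hr htm hFA hFB h1 h89 hc1 hc89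
    obtain ⟨FB', rfl⟩ : ∃ FB', FB = FB' + 1 := ⟨FB - 1, by omega⟩
    by_cases hm1 : c1.contains m
    · have ht1 : t = 1 := pvTermOf_unique htm (hc1 m ((PySem.Set.contains_iff _ _).mp hm1))
      subst ht1
      rw [if_pos rfl]
      exact ⟨trail, by rw [pvBuildTrail, if_pos hm1],
        by rw [pvLoopA, if_pos hm1, if_pos rfl]⟩
    · by_cases hm89 : c89.contains m
      · have ht89 : t = 89 :=
          pvTermOf_unique htm (hc89 m ((PySem.Set.contains_iff _ _).mp hm89))
        subst ht89
        rw [if_neg (by decide : ¬(89:Int) = 1)]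
        exact ⟨trail, by rw [pvBuildTrail, if_pos hm89],
          by rw [pvLoopA, if_neg hm1, if_pos hm89, if_neg (by decide : ¬(89:Int) = 1)]⟩
      · have hm1' : m ∉ c1 := fun h => hm1 ((PySem.Set.contains_iff _ _).mpr h)
        have hm89' : m ∉ c89 := fun h => hm89 ((PySem.Set.contains_iff _ _).mpr h)
        have hne1 : m ≠ 1 := fun h => hm1' (h ▸ h1)
        have hne89 : m ≠ 89 := fun h => hm89' (h ▸ h89)
        obtain ⟨hr', hlt⟩ := pvDist_step hr hne1 hne89
        have hct : (if t = 1 then c1 else c89).contains m = false := by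
          split
          · cases hb : c1.contains m
            · rfl
            · exact absurd hb hm1
          · cases hb : c89.contains m
            · rfl
            · exact absurd hb hm89
        obtain ⟨tr, htr, hA⟩ := ih (pvSqDigits m) (PySem.Set.add trail (pvSqDigits m))
          c1 c89 FB' t (pvSqDigits_nonneg m hm) hr' (pvTermOf_step htm hne1 hne89)
          (by omega) (by omega) h1 h89 hc1 hc89
        refine ⟨tr, ?_, ?_⟩
        · rw [pvBuildTrail, if_neg (by rw [hct]; simp),
            show pvDigitSquareSum m = pvSqDigits m from (pvStep_eq m hm).symm]
          exact htr
        · rw [pvLoopA, if_neg hm1, if_neg hm89]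
          exact hA

-- fold two functions that agree along an invariant
theorem pvFoldlInv {α β : Type} (fA fB : β → α → β) (l : List α) (Inv : β → Prop)
    (h : ∀ q a, a ∈ l → Inv q → fA q a = fB q a ∧ Inv (fB q a)) :
    ∀ p, Inv p → l.foldl fA p = l.foldl fB p := by
  induction l with
  | nil => intro p _; rfl
  | cons a l ih =>
    intro p hp
    obtain ⟨heq, hinv⟩ := h p a (List.mem_cons_self ..) hp
    rw [List.foldl_cons, List.foldl_cons, heq]
    exact ih (fun q b hb hq => h q b (List.mem_cons_of_mem _ hb) hq) _ hinv

def pvInv (p : PySem.Set Int × PySem.Set Int) : Prop :=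
  (1:Int) ∈ p.1 ∧ (89:Int) ∈ p.2 ∧ (∀ x ∈ p.1, pvTermOf x 1) ∧ (∀ x ∈ p.2, pvTermOf x 89)

-- ===== VERDICT (by name: the statement is the Claim_ definition above) =====
theorem pvInv_init : pvInv ([1], [89]) := by
  refine ⟨by simp, by simp, ?_, ?_⟩
  · intro x hx
    simp only [List.mem_singleton] at hx
    subst hx
    exact ⟨1, by decide⟩
  · intro x hx
    simp only [List.mem_singleton] at hx
    subst hx
    exact ⟨1, by decide⟩

theorem memoised_chain_spec : Claim_equal_memoised_chain := by
  intro ub hdom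
  have hub : ub ≤ 2147483648 := by
    simp only [Dom_memoised_chain, pvDomInt, decide_eq_true_eq] at hdom
    exact hdom.2
  show memoised_chain ub = memoised_chain_alt ub
  unfold memoised_chain memoised_chain_alt
  refine pvFoldlInv _ _ _ pvInv ?_ _ pvInv_init
  intro q a ha hq
  obtain ⟨hq1, hq89, hqc1, hqc89⟩ := hq
  have hmem := PySem.List.mem_pyRange_one.mp ha
  have ha2 : 2 ≤ a := hmem.1
  have haub : a < ub := hmem.2
  have ha0 : 0 ≤ a := by omega
  have h10 : a < 10 ^ 10 := by omega
  have hsome := pvT21 a (by omega) h10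
  obtain ⟨t, ht⟩ := Option.isSome_iff_exists.mp hsome
  have htm : pvTermOf a t := ⟨21, ht⟩
  have hr : pvReach a := ⟨21, hsome⟩
  have hdl : pvDist a ≤ 21 := pvDist_le hsome
  have hshape := pvT_shape 21 a t ht
  have hfind : pvFindTerm 1000 a = some t := by
    rw [pvFindTerm_eq_pvT 1000 a ha0]
    exact pvT_mono 21 1000 a t (by omega) ht
  obtain ⟨tr1, htr1, hA1⟩ :=
    pvSync 1000 a (PySem.Set.add PySem.Set.empty a) q.1 q.2 1000 t ha0 hr htm
      (by omega) (by omega) hq1 hq89 hqc1 hqc89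
  rcases hshape with rfl | rfl
  · rw [if_pos rfl] at htr1 hA1
    have hB : (match pvFindTerm 1000 a with
        | none => q
        | some t =>
          match pvBuildTrail 1000 a (PySem.Set.add PySem.Set.empty a)
              (if t == 1 then q.1 else q.2) with
          | none => q
          | some trail =>
            if t == 1 then (PySem.Set.union q.1 trail, q.2)
            else (q.1, PySem.Set.union q.2 trail))
        = (PySem.Set.union q.1 tr1, q.2) := by
      rw [hfind]
      simp [show pvBuildTrail 1000 a [a] q.1 = some tr1 from htr1]
    have hmemtr := pvBuildTrail_mem 1000 a (PySem.Set.add PySem.Set.empty a) q.1 1 tr1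
      ha0 htm hq1 htr1
    have hInv : pvInv (PySem.Set.union q.1 tr1, q.2) := by
      refine ⟨(PySem.Set.mem_union _ _ _).mpr (Or.inl hq1), hq89, ?_, hqc89⟩
      intro x hx
      rcases (PySem.Set.mem_union _ _ _).mp hx with h | h
      · exact hqc1 x h
      · rcases hmemtr x h with h' | h'
        · rcases (PySem.Set.mem_add _ _ _).mp h' with h' | h'
          · simp [PySem.Set.empty] at h'
          · exact h' ▸ htm
        · exact h'
    exact ⟨hA1.trans hB.symm, hB.symm ▸ hInv⟩
  · rw [if_neg (by decide : ¬(89:Int) = 1)] at htr1 hA1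
    have hB : (match pvFindTerm 1000 a with
        | none => q
        | some t =>
          match pvBuildTrail 1000 a (PySem.Set.add PySem.Set.empty a)
              (if t == 1 then q.1 else q.2) with
          | none => q
          | some trail =>
            if t == 1 then (PySem.Set.union q.1 trail, q.2)
            else (q.1, PySem.Set.union q.2 trail))
        = (q.1, PySem.Set.union q.2 tr1) := by
      rw [hfind]
      simp [show pvBuildTrail 1000 a [a] q.2 = some tr1 from htr1]
    have hmemtr := pvBuildTrail_mem 1000 a (PySem.Set.add PySem.Set.empty a) q.2 89 tr1
      ha0 htm hq89 htr1
    have hInv : pvInv (q.1, PySem.Set.union q.2 tr1) := by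
      refine ⟨hq1, (PySem.Set.mem_union _ _ _).mpr (Or.inl hq89), hqc1, ?_⟩
      intro x hx
      rcases (PySem.Set.mem_union _ _ _).mp hx with h | h
      · exact hqc89 x h
      · rcases hmemtr x h with h' | h'
        · rcases (PySem.Set.mem_add _ _ _).mp h' with h' | h'
          · simp [PySem.Set.empty] at h'
          · exact h' ▸ htm
        · exact h'
    exact ⟨hA1.trans hB.symm, hB.symm ▸ hInv⟩
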